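-- pv_equiv track=rewrite | github.com/mblsha/retrobus-explorer | gateware/reference/spade-projects/tools/gen_project_xdc.py | infer_profiles
-- ===== SOURCE A (Python) =====
-- def infer_profiles(port_names: set[str]) -> list[str]:
--     profiles: list[str] = ["alchitry_base"]
--     if "saleae" in port_names:
--         profiles.append("saleae")
--     if "ffc_data" in port_names:
--         profiles.append("pin_tester_ffc")
--     if any(name.startswith("ft_") for name in port_names):
--         profiles.append("ft_v1")
--     if any(name.startswith("conn_") for name in port_names):
--         profiles.append("sharp_organizer_bus")
--     if (
--         any(name.startswith("z80_") for name in port_names)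
--         or "addr_bnk" in port_names
--         or "addr_ceram2" in port_names
--         or "addr_cerom2" in port_names
--     ):
--         profiles.append("sharp_pc_g850_bus")
--     return profiles
-- ===== SOURCE B (Python) =====
-- def infer_profiles(port_names: set[str]) -> list[str]:
--     # One pass over port_names accumulating boolean trigger flags, then emit profiles.
--     saleae = ffc = ft = conn = z80 = addr = False
--     for name in port_names:
--         if name == "saleae":
--             saleae = True
--         if name == "ffc_data":
--             ffc = True
--         if name.startswith("ft_"):
--             ft = True
--         if name.startswith("conn_"):
--             conn = True
--         if name.startswith("z80_"):
--             z80 = True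
--         if name in ("addr_bnk", "addr_ceram2", "addr_cerom2"):
--             addr = True
--     profiles = ["alchitry_base"]
--     if saleae:
--         profiles.append("saleae")
--     if ffc:
--         profiles.append("pin_tester_ffc")
--     if ft:
--         profiles.append("ft_v1")
--     if conn:
--         profiles.append("sharp_organizer_bus")
--     if z80 or addr:
--         profiles.append("sharp_pc_g850_bus")
--     return profiles
-- ===== Notes on version B (the rewrite author's own statement) =====
-- stated objective: alternative
-- what changed: Replaces A's six separate scans of port_names (two membership tests, three any() generator scans, and three more membership tests in the last condition) with a single pass that accumulates six boolean trigger flags and then emits the profile list from the flags.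
import Mathlib
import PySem

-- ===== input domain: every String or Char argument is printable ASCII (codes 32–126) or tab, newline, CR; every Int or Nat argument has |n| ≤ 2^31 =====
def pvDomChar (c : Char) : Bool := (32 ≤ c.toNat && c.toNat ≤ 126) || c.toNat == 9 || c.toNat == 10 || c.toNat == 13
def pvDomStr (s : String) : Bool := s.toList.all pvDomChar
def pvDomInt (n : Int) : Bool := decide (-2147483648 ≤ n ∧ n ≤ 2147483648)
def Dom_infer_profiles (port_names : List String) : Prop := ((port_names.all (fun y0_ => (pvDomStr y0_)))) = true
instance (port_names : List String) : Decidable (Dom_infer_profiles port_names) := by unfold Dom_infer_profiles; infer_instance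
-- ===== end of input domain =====

-- B replaces A's eight separate scans of port_names by one pass accumulating six boolean flags (alternative decomposition, same result).

-- ===== PORT A =====
-- A: start with ["alchitry_base"], then five independent scans/membership tests, each appending one profile.
def infer_profiles (port_names : List String) : List String :=
  let profiles : List String := ["alchitry_base"]
  let profiles := if port_names.contains "saleae" then profiles ++ ["saleae"] else profiles
  let profiles := if port_names.contains "ffc_data" then profiles ++ ["pin_tester_ffc"] else profiles
  let profiles := if port_names.any (fun name => PySem.Str.startswith name "ft_") then profiles ++ ["ft_v1"] else profiles
  let profiles := if port_names.any (fun name => PySem.Str.startswith name "conn_") then profiles ++ ["sharp_organizer_bus"] else profiles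
  let profiles := if (port_names.any (fun name => PySem.Str.startswith name "z80_")
      || port_names.contains "addr_bnk"
      || port_names.contains "addr_ceram2"
      || port_names.contains "addr_cerom2") then profiles ++ ["sharp_pc_g850_bus"] else profiles
  profiles

-- ===== PORT B =====
-- B-side helper: one step of the single pass, updating the six trigger flags (as in Source B's loop body).
def pvStepB (st : Bool × Bool × Bool × Bool × Bool × Bool) (name : String) :
    Bool × Bool × Bool × Bool × Bool × Bool :=
  let (s, f, t, c, z, a) := st
  ( if name == "saleae" then true else s
  , if name == "ffc_data" then true else f
  , if PySem.Str.startswith name "ft_" then true else t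
  , if PySem.Str.startswith name "conn_" then true else c
  , if PySem.Str.startswith name "z80_" then true else z
  , if (name == "addr_bnk" || name == "addr_ceram2" || name == "addr_cerom2") then true else a )

def infer_profiles_alt (port_names : List String) : List String :=
  let (saleae, ffc, ft, conn, z80, addr) :=
    port_names.foldl pvStepB (false, false, false, false, false, false)
  let profiles : List String := ["alchitry_base"]
  let profiles := if saleae then profiles ++ ["saleae"] else profiles
  let profiles := if ffc then profiles ++ ["pin_tester_ffc"] else profiles
  let profiles := if ft then profiles ++ ["ft_v1"] else profiles
  let profiles := if conn then profiles ++ ["sharp_organizer_bus"] else profiles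
  let profiles := if (z80 || addr) then profiles ++ ["sharp_pc_g850_bus"] else profiles
  profiles

-- ===== PRECONDITION & SPEC =====
def Spec_infer_profiles (port_names : List String) (out : List String) : Prop := out = infer_profiles_alt port_names
instance (port_names : List String) (out : List String) : Decidable (Spec_infer_profiles port_names out) := by unfold Spec_infer_profiles; infer_instance

-- ===== CLAIM (what is proved, stated in full; the proofs are below) =====
def Claim_equal_infer_profiles : Prop := ∀ (port_names : List String), Dom_infer_profiles port_names → Spec_infer_profiles port_names (infer_profiles port_names)

-- ===== LEMMAS AND PROOFS =====

theorem pvOrStep (c b r : Bool) : ((if c then true else b) || r) = (b || (c || r)) := by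
  cases c <;> cases b <;> simp

theorem pvFold_spec (l : List String) : ∀ s f t c z a : Bool,
    l.foldl pvStepB (s, f, t, c, z, a) =
      ( s || l.any (fun n => n == "saleae")
      , f || l.any (fun n => n == "ffc_data")
      , t || l.any (fun n => PySem.Str.startswith n "ft_")
      , c || l.any (fun n => PySem.Str.startswith n "conn_")
      , z || l.any (fun n => PySem.Str.startswith n "z80_")
      , a || l.any (fun n => n == "addr_bnk" || n == "addr_ceram2" || n == "addr_cerom2") ) := by
  induction l with
  | nil => intro s f t c z a; simp
  | cons x xs ih =>
    intro s f t c z a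
    simp only [List.foldl_cons, pvStepB, List.any_cons, ih, pvOrStep]

theorem pvContains_any (l : List String) (a : String) :
    l.contains a = l.any (fun x => x == a) := by
  induction l with
  | nil => rfl
  | cons x xs ih =>
    simp only [List.contains_cons, List.any_cons, ← ih]
    rw [BEq.comm]

theorem pvAny_or (l : List String) (p q : String → Bool) :
    l.any (fun x => p x || q x) = (l.any p || l.any q) := by
  induction l with
  | nil => rfl
  | cons x xs ih => simp only [List.any_cons, ih]; cases p x <;> cases q x <;> simp

-- ===== VERDICT (by name: the statement is the Claim_ definition above) =====
theorem infer_profiles_spec : Claim_equal_infer_profiles := by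
  intro l _
  show infer_profiles l = infer_profiles_alt l
  unfold infer_profiles infer_profiles_alt
  rw [pvFold_spec]
  simp only [pvContains_any, pvAny_or, Bool.false_or, Bool.or_assoc]
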